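-- pv_equiv track=rewrite | github.com/dlloyd1977/comms | docs/kybalion/docs/audits/header_nav/run_header_audit.py | class_tokens
-- ===== SOURCE A (Python) =====
-- def class_tokens(attrs: dict[str, str]) -> list[str]:
-- 	classes = attrs.get("class", "")
-- 	tokens = {token.strip() for token in classes.split() if token.strip()}
-- 	preferred_order = [
-- 		"button",
-- 		"primary",
-- 		"secondary",
-- 		"menu-link",
-- 		"menu-sessions-trigger",
-- 		"search-button",
-- 		"admin-only",
-- 		"is-active",
-- 		"is-hidden",
-- 		"file-input-hidden",
-- 		"view-pill-button",
-- 	]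
-- 	ordered: list[str] = []
-- 	for token in preferred_order:
-- 		if token in tokens:
-- 			ordered.append(token)
-- 			tokens.remove(token)
-- 	ordered.extend(sorted(tokens))
-- 	return ordered
-- ===== SOURCE B (Python) =====
-- def class_tokens(attrs: dict[str, str]) -> list[str]:
-- 	preferred_order = [
-- 		"button",
-- 		"primary",
-- 		"secondary",
-- 		"menu-link",
-- 		"menu-sessions-trigger",
-- 		"search-button",
-- 		"admin-only",
-- 		"is-active",
-- 		"is-hidden",
-- 		"file-input-hidden",
-- 		"view-pill-button",
-- 	]
-- 	rank = {name: i for i, name in enumerate(preferred_order)}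
-- 	classes = attrs.get("class", "")
-- 	tokens = {token.strip() for token in classes.split() if token.strip()}
-- 	return sorted(tokens, key=lambda t: (rank.get(t, len(preferred_order)), t))
-- ===== Notes on version B (the rewrite author's own statement) =====
-- stated objective: simpler
-- what changed: Replaces A's explicit scan of the preferred list with set membership tests and removals (then sorting the leftovers) by building a rank dictionary once and returning a single sorted() call keyed by (rank, token).
import Mathlib
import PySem

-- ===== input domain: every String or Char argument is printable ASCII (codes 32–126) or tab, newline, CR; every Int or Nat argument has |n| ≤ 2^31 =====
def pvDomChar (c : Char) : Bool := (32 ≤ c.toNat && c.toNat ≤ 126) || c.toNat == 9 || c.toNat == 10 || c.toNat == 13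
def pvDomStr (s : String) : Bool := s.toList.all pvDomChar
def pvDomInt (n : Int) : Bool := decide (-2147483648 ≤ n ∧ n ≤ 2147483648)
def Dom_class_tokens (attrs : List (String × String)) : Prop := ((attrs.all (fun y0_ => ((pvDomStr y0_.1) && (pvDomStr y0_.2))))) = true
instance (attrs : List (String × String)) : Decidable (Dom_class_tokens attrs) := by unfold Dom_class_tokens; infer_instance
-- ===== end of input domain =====

-- B replaces A's explicit preferred-list scan with set removal by one keyed sort
-- over a rank dictionary (objective: simpler decomposition, same cost).

-- ===== PORT A =====
def class_tokens (attrs : List (String × String)) : List String :=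
  let classes := (PySem.Dict.ofList attrs).getD "class" ""
  let tokens : PySem.Set String :=
    PySem.Set.ofList (((PySem.Str.split₀ classes).filter
      (fun token => !(PySem.Str.strip token == ""))).map PySem.Str.strip)
  let preferred_order : List String :=
    ["button", "primary", "secondary", "menu-link", "menu-sessions-trigger",
     "search-button", "admin-only", "is-active", "is-hidden",
     "file-input-hidden", "view-pill-button"]
  let st := preferred_order.foldl
    (fun (st : List String × PySem.Set String) token =>
      if PySem.Set.contains st.2 token then
        -- 'tokens.remove(token)' under the contains guard: discard = remove here
        (st.1 ++ [token], PySem.Set.discard st.2 token)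
      else st)
    ([], tokens)
  st.1 ++ PySem.List.sorted st.2 (fun x => x) false

-- ===== PORT B =====
def class_tokens_alt (attrs : List (String × String)) : List String :=
  let preferred_order : List String :=
    ["button", "primary", "secondary", "menu-link", "menu-sessions-trigger",
     "search-button", "admin-only", "is-active", "is-hidden",
     "file-input-hidden", "view-pill-button"]
  let rank : PySem.Dict String Int :=
    (PySem.List.enumerate preferred_order).foldl
      (fun d p => d.insert p.2 p.1) PySem.Dict.empty
  let classes := (PySem.Dict.ofList attrs).getD "class" ""
  let tokens : PySem.Set String :=
    PySem.Set.ofList (((PySem.Str.split₀ classes).filter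
      (fun token => !(PySem.Str.strip token == ""))).map PySem.Str.strip)
  PySem.List.sorted2 tokens
    (fun t => rank.getD t (PySem.List.len preferred_order)) (fun t => t) false

-- ===== PRECONDITION & SPEC =====
def Spec_class_tokens (attrs : List (String × String)) (out : List String) : Prop := out = class_tokens_alt attrs
instance (attrs : List (String × String)) (out : List String) : Decidable (Spec_class_tokens attrs out) := by unfold Spec_class_tokens; infer_instance

-- ===== CLAIM (what is proved, stated in full; the proofs are below) =====
def Claim_equal_class_tokens : Prop := ∀ (attrs : List (String × String)), Dom_class_tokens attrs → Spec_class_tokens attrs (class_tokens attrs)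

-- ===== LEMMAS AND PROOFS =====

def pvPref : List String :=
  ["button", "primary", "secondary", "menu-link", "menu-sessions-trigger",
   "search-button", "admin-only", "is-active", "is-hidden",
   "file-input-hidden", "view-pill-button"]

def pvRank : PySem.Dict String Int :=
  (PySem.List.enumerate pvPref).foldl (fun d p => d.insert p.2 p.1) PySem.Dict.empty

def pvKey (t : String) : Lex (Int × String) :=
  toLex (pvRank.getD t (PySem.List.len pvPref), t)

-- pointwise-equal comparators give the same insertion
theorem pv_insertBy_congr {α : Type} (f g : α → α → Bool) (x : α) (l : List α)
    (h : ∀ a b, f a b = g a b) :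
    PySem.List.insertBy f x l = PySem.List.insertBy g x l := by
  induction l with
  | nil => rfl
  | cons y ys ih => simp only [PySem.List.insertBy, h, ih]

-- sorted2 with an Int/String key pair is sorted with the lexicographic key
theorem pv_sorted2_eq_sorted_lex (xs : List String) (k1 : String → Int) :
    PySem.List.sorted2 xs k1 (fun t => t) false
      = PySem.List.sorted xs (fun t => toLex (k1 t, t)) false := by
  unfold PySem.List.sorted2 PySem.List.sorted
  apply PySem.List.foldl_congr_mem
  intro acc x _
  apply pv_insertBy_congr
  intro a b
  by_cases h1 : k1 a < k1 b <;> by_cases h2 : k1 b < k1 a <;>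
    simp [Prod.Lex.lt_iff, h1, h2] <;> omega

-- A's partition loop, characterised
theorem pv_fold_partition (P : List String) (hP : P.Nodup) (o tk : List String) :
    P.foldl
      (fun (st : List String × PySem.Set String) token =>
        if PySem.Set.contains st.2 token then
          (st.1 ++ [token], PySem.Set.discard st.2 token)
        else st) (o, tk)
    = (o ++ P.filter (fun t => tk.contains t),
       tk.filter (fun x => !P.contains x)) := by
  induction P generalizing o tk with
  | nil => simp
  | cons t P' ih =>
    rcases List.nodup_cons.mp hP with ⟨ht, hP'⟩
    by_cases h : PySem.Set.contains tk t
    · simp only [List.foldl_cons, h, if_pos]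
      rw [ih hP']
      simp only [Prod.mk.injEq]
      constructor
      · have hfc : P'.filter (fun t' => List.contains (PySem.Set.discard tk t) t')
            = P'.filter (fun t' => tk.contains t') := by
          refine List.filter_congr (fun x hx => ?_)
          have hxt : x ≠ t := fun he => ht (he ▸ hx)
          simp [PySem.Set.discard, List.contains_eq_mem, List.mem_filter, hxt]
          
        rw [hfc, List.filter_cons_of_pos (by simpa using h), List.append_assoc]
        rfl
      · simp only [PySem.Set.discard, List.filter_filter]
        refine List.filter_congr (fun x hx => ?_)
        by_cases hxt : x = t <;> simp [hxt, Bool.and_comm]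
    · simp only [List.foldl_cons, h, if_neg, Bool.false_eq_true, not_false_iff]
      rw [ih hP']
      have hnt : t ∉ tk := by
        simpa [PySem.Set.contains, List.contains_eq_mem] using h
      simp only [Prod.mk.injEq]
      constructor
      · rw [List.filter_cons_of_neg (by simpa using h)]
      · refine List.filter_congr (fun x hx => ?_)
        have hxt : x ≠ t := fun he => hnt (he ▸ hx)
        simp [hxt]

theorem pv_rank_lt (t : String) (h : t ∈ pvPref) :
    pvRank.getD t (PySem.List.len pvPref) < PySem.List.len pvPref := by
  fin_cases h <;> decide

theorem pv_rank_default (t : String) (h : t ∉ pvPref) :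
    pvRank.getD t (PySem.List.len pvPref) = PySem.List.len pvPref := by
  apply PySem.Dict.getD_of_not_contains
  have hk : pvRank.keys = pvPref := by decide
  rw [PySem.Dict.contains_eq_decide_mem_keys, hk]
  simpa using h

theorem pv_pref_pairwise :
    pvPref.Pairwise (fun a b =>
      pvRank.getD a (PySem.List.len pvPref) < pvRank.getD b (PySem.List.len pvPref)) := by
  decide

theorem pv_main (tokens : List String) (hnd : tokens.Nodup) :
    (pvPref.filter (fun t => tokens.contains t)
      ++ PySem.List.sorted (tokens.filter (fun x => !pvPref.contains x)) (fun x => x) false)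
    = PySem.List.sorted tokens pvKey false := by
  set R := tokens.filter (fun x => !pvPref.contains x) with hR
  set s := PySem.List.sorted R (fun x => x) false with hs
  have hPnd : pvPref.Nodup := by decide
  have hsperm : s.Perm R := PySem.List.sorted_perm R (fun x => x) false
  have hmem1 : ∀ a ∈ pvPref.filter (fun t => tokens.contains t), a ∈ pvPref ∧ a ∈ tokens := by
    intro a ha
    have h := List.mem_filter.mp ha
    exact ⟨h.1, by simpa [List.contains_eq_mem] using h.2⟩
  have hmem2 : ∀ b ∈ s, b ∈ tokens ∧ b ∉ pvPref := by
    intro b hb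
    have hbR : b ∈ R := hsperm.mem_iff.mp hb
    have h := List.mem_filter.mp hbR
    exact ⟨h.1, by simpa [List.contains_eq_mem] using h.2⟩
  symm
  apply PySem.List.sorted_eq_of_perm_of_pairwise_lt
  · have h1 : (pvPref.filter (fun t => tokens.contains t)).Perm
        (tokens.filter (fun x => pvPref.contains x)) := by
      rw [List.perm_ext_iff_of_nodup (hPnd.filter _) (hnd.filter _)]
      intro a
      simp [List.mem_filter, List.contains_eq_mem, and_comm]
    exact (h1.append hsperm).trans (List.filter_append_perm _ tokens)
  · rw [List.pairwise_append]
    refine ⟨?_, ?_, ?_⟩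
    · refine List.Pairwise.imp ?_ (List.Pairwise.sublist List.filter_sublist pv_pref_pairwise)
      intro a b hab
      exact Prod.Lex.lt_iff.mpr (Or.inl hab)
    · have hle : s.Pairwise (fun a b => a ≤ b) := PySem.List.sorted_pairwise R (fun x => x)
      have hndS : s.Nodup := hsperm.symm.nodup (hnd.filter _)
      refine List.Pairwise.imp_of_mem ?_ (hle.and hndS)
      intro a b ha hb hab
      refine Prod.Lex.lt_iff.mpr (Or.inr ⟨?_, lt_of_le_of_ne hab.1 hab.2⟩)
      show pvRank.getD a _ = pvRank.getD b _
      rw [pv_rank_default a (hmem2 a ha).2, pv_rank_default b (hmem2 b hb).2]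
    · intro a ha b hb
      refine Prod.Lex.lt_iff.mpr (Or.inl ?_)
      show pvRank.getD a _ < pvRank.getD b _
      rw [pv_rank_default b (hmem2 b hb).2]
      exact pv_rank_lt a (hmem1 a ha).1

-- ===== VERDICT (by name: the statement is the Claim_ definition above) =====
theorem class_tokens_spec : Claim_equal_class_tokens := by
  intro attrs _
  simp only [Spec_class_tokens, class_tokens, class_tokens_alt]
  have hL : (["button", "primary", "secondary", "menu-link", "menu-sessions-trigger",
      "search-button", "admin-only", "is-active", "is-hidden",
      "file-input-hidden", "view-pill-button"] : List String) = pvPref := rfl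
  rw [hL, pv_fold_partition pvPref (by decide), pv_sorted2_eq_sorted_lex]
  simp only [List.nil_append]
  exact pv_main _ (PySem.Set.nodup_ofList _)
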